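-- pv_equiv track=rewrite | github.com/fcbaernyang/tag_program | tag.py | open_dataset_char
-- ===== SOURCE A (Python) =====
-- def open_dataset_char(sentence):
--     #用于对语句进行分字的函数，对英文字符和数字进行了处理，将英文单词和数字作为整体进行分割
--
--     sentence=sentence.strip()
--     char_list=[]
--     ss=""
--     for s in sentence:
--         if s.islower() or  s.isupper()  or s.isdigit():
--             ss=ss+s
--         elif s==' ':
--             if len(ss)!=0:
--                 char_list.append(ss)
--                 ss=""
--         else:
--             if len(ss)!=0:
--                 char_list.append(ss)
--                 ss=""
--             char_list.append(s)
--     if len(ss)!=0: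
--         char_list.append(ss)
--
--     return char_list
-- ===== SOURCE B (Python) =====
-- def open_dataset_char(sentence):
--     # Run-scanning re-implementation: extract each maximal alphanumeric run
--     # with an inner scan and slice, instead of A's accumulator-and-flush loop.
--     s = sentence.strip()
--     out = []
--     i, n = 0, len(s)
--     while i < n:
--         c = s[i]
--         if c.islower() or c.isupper() or c.isdigit():
--             j = i
--             while j < n and (s[j].islower() or s[j].isupper() or s[j].isdigit()):
--                 j += 1
--             out.append(s[i:j])
--             i = j
--         elif c == ' ':
--             i += 1
--         else:
--             out.append(c)
--             i += 1
--     return out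
-- ===== Notes on version B (the rewrite author's own statement) =====
-- stated objective: alternative
-- what changed: B replaces A's character-accumulator with flush logic by a run-scanning loop that finds each maximal alphanumeric run with an inner scan and slices it out whole.
import Mathlib
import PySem

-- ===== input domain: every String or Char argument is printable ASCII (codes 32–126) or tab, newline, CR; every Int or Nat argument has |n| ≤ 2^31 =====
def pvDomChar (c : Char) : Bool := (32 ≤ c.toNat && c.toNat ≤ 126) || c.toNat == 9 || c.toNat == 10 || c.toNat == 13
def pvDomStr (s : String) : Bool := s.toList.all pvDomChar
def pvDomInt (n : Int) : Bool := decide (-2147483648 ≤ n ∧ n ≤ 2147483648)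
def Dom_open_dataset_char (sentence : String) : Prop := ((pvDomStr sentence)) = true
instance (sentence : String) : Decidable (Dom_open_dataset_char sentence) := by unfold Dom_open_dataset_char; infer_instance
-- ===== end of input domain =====

-- B replaces A's accumulator-and-flush loop by a run-scanning recursion (alternative decomposition, same cost class).

-- ===== PORT A =====
-- A's loop body: state = (char_list, ss); ss kept as the list of chars of the partial word.
def pvStepA (st : List String × List Char) (s : Char) : List String × List Char :=
  if PySem.Chars.islower s || PySem.Chars.isupper s || PySem.Chars.isdigit s then
    (st.1, st.2 ++ [s])
  else if s == ' ' then
    if st.2.length != 0 then (st.1 ++ [String.ofList st.2], []) else st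
  else
    ((if st.2.length != 0 then st.1 ++ [String.ofList st.2] else st.1) ++ [String.ofList [s]], [])

def open_dataset_char (sentence : String) : List String :=
  let st := (PySem.Str.strip sentence).toList.foldl pvStepA ([], [])
  if st.2.length != 0 then st.1 ++ [String.ofList st.2] else st.1

-- ===== PORT B =====
def pvIsWord (c : Char) : Bool :=
  PySem.Chars.islower c || PySem.Chars.isupper c || PySem.Chars.isdigit c

-- run scanner: a word run is taken whole (takeWhile = B's inner scan + slice)
def pvRuns : List Char → List String
  | [] => []
  | c :: rest =>
    if pvIsWord c then
      String.ofList ((c :: rest).takeWhile pvIsWord) :: pvRuns ((c :: rest).dropWhile pvIsWord)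
    else if c == ' ' then pvRuns rest
    else String.ofList [c] :: pvRuns rest
termination_by cs => cs.length
decreasing_by
  · have h : pvIsWord c = true := by assumption
    simpa [List.dropWhile_cons, h] using Nat.lt_succ_of_le (List.length_dropWhile_le pvIsWord rest)
  · exact Nat.lt_succ_self rest.length
  · exact Nat.lt_succ_self rest.length

def open_dataset_char_alt (sentence : String) : List String :=
  pvRuns (PySem.Str.strip sentence).toList

-- ===== PRECONDITION & SPEC =====
def Spec_open_dataset_char (sentence : String) (out : List String) : Prop := out = open_dataset_char_alt sentence
instance (sentence : String) (out : List String) : Decidable (Spec_open_dataset_char sentence out) := by unfold Spec_open_dataset_char; infer_instance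

-- ===== CLAIM (what is proved, stated in full; the proofs are below) =====
def Claim_equal_open_dataset_char : Prop := ∀ (sentence : String), Dom_open_dataset_char sentence → Spec_open_dataset_char sentence (open_dataset_char sentence)

-- ===== LEMMAS AND PROOFS =====

-- the pending partial word ss glued onto the run decomposition of the remaining input
def pvGlue (ss cs : List Char) : List String :=
  if ss = [] then pvRuns cs
  else String.ofList (ss ++ cs.takeWhile pvIsWord) :: pvRuns (cs.dropWhile pvIsWord)

theorem pvGlue_word (ss : List Char) (c : Char) (cs : List Char) (hc : pvIsWord c = true) :
    pvGlue (ss ++ [c]) cs = pvGlue ss (c :: cs) := by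
  unfold pvGlue
  by_cases h : ss = []
  · subst h
    simp [pvRuns, hc]
  · simp [h, hc]

theorem pvLoop (cs : List Char) : ∀ (acc : List String) (ss : List Char),
    (let st := cs.foldl pvStepA (acc, ss);
     if st.2.length != 0 then st.1 ++ [String.ofList st.2] else st.1) = acc ++ pvGlue ss cs := by
  induction cs with
  | nil =>
    intro acc ss
    by_cases h : ss = [] <;> simp [pvGlue, pvRuns, h]
  | cons c cs ih =>
    intro acc ss
    simp only [List.foldl_cons]
    by_cases hw : pvIsWord c = true
    · have hw2 : (PySem.Chars.islower c || PySem.Chars.isupper c || PySem.Chars.isdigit c) = true := by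
        simpa [pvIsWord] using hw
      have : pvStepA (acc, ss) c = (acc, ss ++ [c]) := by
        simp [pvStepA, hw2]
      rw [this, ih, pvGlue_word ss c cs hw]
    · have hw' : (PySem.Chars.islower c || PySem.Chars.isupper c || PySem.Chars.isdigit c) = false := by
        simpa [pvIsWord] using hw
      by_cases hsp : c = ' '
      · subst hsp
        by_cases h : ss = []
        · have : pvStepA (acc, ss) ' ' = (acc, ss) := by simp [pvStepA, hw', h]
          rw [this, ih]
          simp [pvGlue, h, pvRuns, hw]
        · have : pvStepA (acc, ss) ' ' = (acc ++ [String.ofList ss], []) := by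
            simp [pvStepA, hw', List.length_eq_zero_iff, h]
          rw [this, ih]
          simp [pvGlue, h, pvRuns, hw]
      · have hne : (c == ' ') = false := by simp [hsp]
        by_cases h : ss = []
        · have : pvStepA (acc, ss) c = (acc ++ [String.ofList [c]], []) := by
            simp [pvStepA, hw', hne, h]
          rw [this, ih]
          simp [pvGlue, h, pvRuns, hw, hne]
        · have : pvStepA (acc, ss) c = (acc ++ [String.ofList ss] ++ [String.ofList [c]], []) := by
            simp [pvStepA, hw', hne, List.length_eq_zero_iff, h]
          rw [this, ih]
          simp [pvGlue, h, pvRuns, hw, hne]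

-- ===== VERDICT (by name: the statement is the Claim_ definition above) =====
theorem open_dataset_char_spec : Claim_equal_open_dataset_char := by
  intro sentence _
  show open_dataset_char sentence = open_dataset_char_alt sentence
  unfold open_dataset_char open_dataset_char_alt
  rw [pvLoop]
  simp [pvGlue]
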